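-- pv_equiv track=rewrite | github.com/RemiMathevet/FoetoPath_v1.2 | FoetoPath_1.2/placenta_cr_templates.py | _item_to_tissue
-- ===== SOURCE A (Python) =====
-- def _item_to_tissue(item_id: str) -> str:
--     """Détermine le tissu auquel appartient un item par son préfixe."""
--     ITEM_TISSUE_MAP = {
--         "cordon_": "cordon",
--         "memb_": "membranes",
--         "pcho_": "plaque_choriale",
--         "villo_": "villosites",
--         "eiv_": "espace_intervilleux",
--         "pbas_": "plaque_basale",
--     }
--     for prefix, tissue in ITEM_TISSUE_MAP.items():
--         if item_id.startswith(prefix):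
--             return tissue
--     return ""
-- ===== SOURCE B (Python) =====
-- def _item_to_tissue(item_id: str) -> str:
--     """Détermine le tissu auquel appartient un item par son préfixe."""
--     ITEM_TISSUE_MAP = {
--         "cordon_": "cordon",
--         "memb_": "membranes",
--         "pcho_": "plaque_choriale",
--         "villo_": "villosites",
--         "eiv_": "espace_intervilleux",
--         "pbas_": "plaque_basale",
--     }
--     i = item_id.find("_")
--     if i == -1:
--         return ""
--     return ITEM_TISSUE_MAP.get(item_id[: i + 1], "")
-- ===== Notes on version B (the rewrite author's own statement) =====
-- stated objective: idiomatic
-- what changed: Replaces A's linear scan of the six prefixes with startswith by computing the key directly (the text up to and including the first underscore, via str.find and a slice) and doing a single dict lookup with a default.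
import Mathlib
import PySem

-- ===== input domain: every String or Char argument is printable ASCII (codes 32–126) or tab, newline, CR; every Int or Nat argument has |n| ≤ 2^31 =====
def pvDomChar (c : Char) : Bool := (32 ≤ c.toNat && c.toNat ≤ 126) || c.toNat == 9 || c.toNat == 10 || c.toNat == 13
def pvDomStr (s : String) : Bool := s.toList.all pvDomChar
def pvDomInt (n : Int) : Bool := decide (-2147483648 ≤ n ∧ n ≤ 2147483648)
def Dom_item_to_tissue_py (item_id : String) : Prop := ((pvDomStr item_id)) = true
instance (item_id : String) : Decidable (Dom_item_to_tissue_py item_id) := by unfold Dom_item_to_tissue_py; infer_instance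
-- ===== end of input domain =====

-- B replaces A's linear startswith scan with one computed key (text up to and including the first '_') and a single dict lookup (objective: idiomatic).

-- ===== PORT A =====
-- the dict literal both Pythons define verbatim
def itemTissueMap : List (String × String) :=
  [("cordon_", "cordon"), ("memb_", "membranes"), ("pcho_", "plaque_choriale"),
   ("villo_", "villosites"), ("eiv_", "espace_intervilleux"), ("pbas_", "plaque_basale")]

-- A's for-loop with early return
def itemTissueLoop (item_id : String) : List (String × String) → String
  | [] => ""
  | (pre, tissue) :: rest =>
      if PySem.Str.startswith item_id pre then tissue else itemTissueLoop item_id rest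

def item_to_tissue_py (item_id : String) : String :=
  itemTissueLoop item_id itemTissueMap

-- ===== PORT B =====
def item_to_tissue_py_alt (item_id : String) : String :=
  let i := PySem.Str.find item_id "_"
  if i = -1 then ""
  else PySem.Dict.getD ⟨itemTissueMap⟩ (PySem.Str.slice item_id none (some (i + 1))) ""

-- ===== PRECONDITION & SPEC =====
def Spec_item_to_tissue_py (item_id : String) (out : String) : Prop := out = item_to_tissue_py_alt item_id
instance (item_id : String) (out : String) : Decidable (Spec_item_to_tissue_py item_id out) := by unfold Spec_item_to_tissue_py; infer_instance

-- ===== CLAIM (what is proved, stated in full; the proofs are below) =====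
def Claim_equal_item_to_tissue_py : Prop := ∀ (item_id : String), Dom_item_to_tissue_py item_id → Spec_item_to_tissue_py item_id (item_to_tissue_py item_id)

-- ===== LEMMAS AND PROOFS =====

-- startswith is false when the pattern carries a char the string lacks
theorem pv_sw_false (s q : List Char) (h : '_' ∉ s) (hq : '_' ∈ q) :
    PySem.Chars.startswith s q = false := by
  rw [Bool.eq_false_iff]
  intro hp
  exact h ((PySem.Chars.startswith_iff s q).mp hp |>.subset hq)

-- a clean-prefix-then-underscore pattern matches iff the clean parts agree
theorem pv_pref_iff (t r q : List Char) (ht : '_' ∉ t) (hq : '_' ∉ q) :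
    (q ++ ['_']) <+: (t ++ '_' :: r) ↔ q = t := by
  induction q generalizing t with
  | nil =>
    cases t with
    | nil => simp
    | cons c t' =>
      constructor
      · rintro ⟨u, hu⟩
        simp only [List.nil_append, List.cons_append,
          List.cons.injEq] at hu
        exact absurd (by simp [← hu.1]) ht
      · intro h; exact absurd h (by simp)
  | cons a q' ih =>
    cases t with
    | nil =>
      constructor
      · rintro ⟨u, hu⟩
        simp only [List.nil_append, List.cons_append, List.cons.injEq] at hu
        exact absurd (by simp [hu.1]) hq
      · intro h; exact absurd h (by simp)
    | cons c t' =>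
      have ht' : '_' ∉ t' := fun hx => ht (by simp [hx])
      have hq' : '_' ∉ q' := fun hx => hq (by simp [hx])
      constructor
      · intro h
        rw [List.cons_append, List.cons_append, List.cons_prefix_cons] at h
        rw [h.1, (ih t' ht' hq').mp h.2]
      · intro h
        rw [← h]
        exact ⟨r, by simp⟩

-- boolean form on the decomposed string
theorem pv_sw_dec (t r q : List Char) (ht : '_' ∉ t) (hq : '_' ∉ q) :
    PySem.Chars.startswith (t ++ '_' :: r) (q ++ ['_']) = decide (q = t) := by
  by_cases h : q = t
  · rw [decide_eq_true h]
    exact (PySem.Chars.startswith_iff _ _).mpr ((pv_pref_iff t r q ht hq).mpr h)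
  · rw [decide_eq_false h, Bool.eq_false_iff]
    intro hb
    exact h ((pv_pref_iff t r q ht hq).mp ((PySem.Chars.startswith_iff _ _).mp hb))

-- key comparison: two ofList keys ending in '_' agree iff the clean parts agree
theorem pv_beq_key (q t : List Char) :
    (String.ofList (q ++ ['_']) == String.ofList (t ++ ['_'])) = decide (q = t) := by
  by_cases h : q = t
  · rw [h, decide_eq_true rfl, beq_self_eq_true]
  · have hne : String.ofList (q ++ ['_']) ≠ String.ofList (t ++ ['_']) := by
      intro he
      apply h
      have := congrArg String.toList he
      simp only [String.toList_ofList] at this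
      exact List.append_left_inj ['_'] |>.mp this
    rw [beq_eq_false_iff_ne.mpr hne, decide_eq_false h]

-- A's scan over any key list of the shape "<clean>_" equals B's first-match lookup with key t ++ "_"
theorem pv_chain (item_id : String) (t r : List Char) (ht : '_' ∉ t)
    (hcs : item_id.toList = t ++ '_' :: r) :
    ∀ L : List (String × String),
      (∀ p ∈ L, ∃ q : List Char, '_' ∉ q ∧ (p.1).toList = q ++ ['_']) →
      itemTissueLoop item_id L
        = (Option.map (fun x => x.2)
            (L.find? (fun p => p.1 == String.ofList (t ++ ['_'])))).getD "" := by
  intro L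
  induction L with
  | nil => intro _; simp [itemTissueLoop]
  | cons hd tl ih =>
    intro hL
    rcases hd with ⟨s, v⟩
    obtain ⟨q, hq, hhd⟩ := hL (s, v) (by simp)
    have hs : s = String.ofList (q ++ ['_']) :=
      String.toList_inj.mp (by rw [hhd, String.toList_ofList])
    have hsw : PySem.Str.startswith item_id s = decide (q = t) := by
      rw [PySem.Str.startswith_eq, hcs, hhd]
      exact pv_sw_dec t r q ht hq
    have hbeq : (s == String.ofList (t ++ ['_'])) = decide (q = t) := by
      rw [hs]; exact pv_beq_key q t
    have hloop : itemTissueLoop item_id ((s, v) :: tl)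
        = if PySem.Str.startswith item_id s = true then v
          else itemTissueLoop item_id tl := rfl
    by_cases hqt : q = t
    · rw [hloop, hsw, decide_eq_true hqt, if_pos rfl,
        List.find?_cons_of_pos (by
          show (s == String.ofList (t ++ ['_'])) = true
          rw [hbeq]; exact decide_eq_true hqt)]
      rfl
    · rw [hloop, hsw, decide_eq_false hqt, if_neg Bool.false_ne_true,
        List.find?_cons_of_neg (by
          show ¬ (s == String.ofList (t ++ ['_'])) = true
          rw [hbeq, decide_eq_false hqt]; exact Bool.false_ne_true)]
      exact ih (fun p hp => hL p (by simp [hp]))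

-- A's scan returns "" when the string has no underscore and every key has one
theorem pv_chain_none (item_id : String) (hm : '_' ∉ item_id.toList) :
    ∀ L : List (String × String),
      (∀ p ∈ L, '_' ∈ (p.1).toList) → itemTissueLoop item_id L = "" := by
  intro L
  induction L with
  | nil => intro _; simp [itemTissueLoop]
  | cons hd tl ih =>
    intro hL
    rcases hd with ⟨s, v⟩
    have hsw : PySem.Str.startswith item_id s = false := by
      rw [PySem.Str.startswith_eq]
      exact pv_sw_false _ _ hm (hL (s, v) (by simp))
    simp only [itemTissueLoop, hsw, Bool.false_eq_true, if_false]
    exact ih (fun p hp => hL p (by simp [hp]))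

-- B unfolded (zeta-reduced let)
theorem pv_alt_eq (item_id : String) :
    item_to_tissue_py_alt item_id
      = if PySem.Str.find item_id "_" = -1 then ""
        else PySem.Dict.getD ⟨itemTissueMap⟩
          (PySem.Str.slice item_id none (some (PySem.Str.find item_id "_" + 1))) "" := rfl

theorem item_to_tissue_main (item_id : String) :
    item_to_tissue_py item_id = item_to_tissue_py_alt item_id := by
  by_cases hm : '_' ∈ item_id.toList
  · -- the string contains an underscore: decompose at the first one
    have hinf : ['_'] <:+: item_id.toList := by
      obtain ⟨l1, l2, h12⟩ := List.append_of_mem hm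
      exact ⟨l1, l2, by simp [h12]⟩
    have hnn : 0 ≤ PySem.Chars.find item_id.toList ['_'] :=
      (PySem.Chars.find_nonneg_iff _ _).mpr hinf
    set n : Nat := (PySem.Chars.find item_id.toList ['_']).toNat with hn
    obtain ⟨h1, h2⟩ := PySem.Chars.find_spec hnn
    obtain ⟨r, hr⟩ : ∃ r, item_id.toList.drop n = '_' :: r := by
      obtain ⟨u, hu⟩ := h1
      exact ⟨u, hu.symm⟩
    have hnlen : n < item_id.toList.length := by
      by_contra hge
      rw [List.drop_eq_nil_of_le (by omega)] at hr
      simp at hr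
    set t : List Char := item_id.toList.take n with htdef
    have htlen : t.length = n := by
      rw [htdef, List.length_take]
      omega
    have hcs : item_id.toList = t ++ '_' :: r := by
      rw [htdef, ← hr, List.take_append_drop]
    have ht : '_' ∉ t := by
      intro hmem
      obtain ⟨l1, l2, h12⟩ := List.append_of_mem hmem
      have hlt : t.length = l1.length + (l2.length + 1) := by rw [h12]; simp
      apply h2 l1.length (by omega)
      have hdrop : item_id.toList.drop l1.length = '_' :: (l2 ++ '_' :: r) := by
        rw [hcs, h12,
          show (l1 ++ '_' :: l2) ++ '_' :: r = l1 ++ ('_' :: (l2 ++ '_' :: r)) from by simp]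
        exact List.drop_left
      exact ⟨l2 ++ '_' :: r, by rw [List.singleton_append, hdrop]⟩
    have hfe : PySem.Str.find item_id "_" = (n : Int) := by
      rw [PySem.Str.find_eq, show ("_" : String).toList = ['_'] from by decide]
      omega
    have hkey : PySem.Str.slice item_id none (some ((n : Int) + 1))
        = String.ofList (t ++ ['_']) := by
      apply String.toList_inj.mp
      rw [PySem.Str.toList_slice, String.toList_ofList, PySem.Chars.slice_eq_listSlice,
        show ((n : Int) + 1) = ((n + 1 : Nat) : Int) from by push_cast; ring,
        PySem.List.slice_to_natCast, hcs, ← htlen, List.take_append]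
      simp
    have hmapkeys : ∀ p ∈ itemTissueMap,
        ∃ q : List Char, '_' ∉ q ∧ (p.1).toList = q ++ ['_'] := by
      intro p hp
      simp only [itemTissueMap, List.mem_cons, List.not_mem_nil, or_false] at hp
      rcases hp with rfl | rfl | rfl | rfl | rfl | rfl
      · exact ⟨"cordon".toList, by decide, by decide⟩
      · exact ⟨"memb".toList, by decide, by decide⟩
      · exact ⟨"pcho".toList, by decide, by decide⟩
      · exact ⟨"villo".toList, by decide, by decide⟩
      · exact ⟨"eiv".toList, by decide, by decide⟩
      · exact ⟨"pbas".toList, by decide, by decide⟩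
    rw [show item_to_tissue_py item_id = itemTissueLoop item_id itemTissueMap from rfl,
      pv_chain item_id t r ht hcs itemTissueMap hmapkeys,
      pv_alt_eq, hfe, if_neg (by omega), hkey]
    rfl
  · -- no underscore: both return ""
    have hni : ¬ ['_'] <:+: item_id.toList := by
      intro ⟨l1, l2, h12⟩
      exact hm (by rw [← h12]; simp)
    have hfe : PySem.Str.find item_id "_" = -1 := by
      rw [PySem.Str.find_eq, show ("_" : String).toList = ['_'] from by decide]
      exact (PySem.Chars.find_eq_neg_one_iff _ _).mpr hni
    rw [show item_to_tissue_py item_id = itemTissueLoop item_id itemTissueMap from rfl,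
      pv_chain_none item_id hm itemTissueMap (by
        intro p hp
        simp only [itemTissueMap, List.mem_cons, List.not_mem_nil, or_false] at hp
        rcases hp with rfl | rfl | rfl | rfl | rfl | rfl <;> decide),
      pv_alt_eq, hfe, if_pos rfl]

-- ===== VERDICT (by name: the statement is the Claim_ definition above) =====
theorem item_to_tissue_py_spec : Claim_equal_item_to_tissue_py := by
  intro item_id _
  unfold Spec_item_to_tissue_py
  exact item_to_tissue_main item_id
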